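-- pv_equiv track=rewrite | github.com/JGynther/moxcore | moxc/mox/ability.py | is_activated_ability
-- ===== SOURCE A (Python) =====
-- def is_activated_ability(input: str) -> bool:
--     currently_inside_quotes = False
--
--     for char in input:
--         match char:
--             case '"':
--                 currently_inside_quotes = not currently_inside_quotes
--             case ":" if not currently_inside_quotes:
--                 return True
--
--     return False
-- ===== SOURCE B (Python) =====
-- def is_activated_ability(input: str) -> bool:
--     parts = input.split('"')
--     return any(':' in seg for i, seg in enumerate(parts) if i % 2 == 0)
-- ===== Notes on version B (the rewrite author's own statement) =====
-- stated objective: simpler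
-- what changed: Replaces the character-by-character quote-toggle state machine with split-on-quote then a scan of the even-indexed (out-of-quote) segments for a colon; the per-character Python loop is replaced by C-level split/substring scans.
import Mathlib
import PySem

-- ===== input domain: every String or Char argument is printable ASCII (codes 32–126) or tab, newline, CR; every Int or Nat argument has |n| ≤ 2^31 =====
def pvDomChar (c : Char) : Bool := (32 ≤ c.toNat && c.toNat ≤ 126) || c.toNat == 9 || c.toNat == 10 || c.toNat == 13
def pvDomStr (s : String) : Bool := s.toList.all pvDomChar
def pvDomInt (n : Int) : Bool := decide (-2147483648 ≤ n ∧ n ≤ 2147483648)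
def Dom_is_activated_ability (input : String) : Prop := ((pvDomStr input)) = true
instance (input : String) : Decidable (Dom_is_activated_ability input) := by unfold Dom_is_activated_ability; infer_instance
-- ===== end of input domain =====

-- B replaces A's per-character quote-toggle state machine by split-on-quote then scanning even-indexed segments for a colon (simpler decomposition, same cost).


-- ===== PORT A =====
-- the for-loop with early return and the quote-toggle state, step for step
def pvGoA : List Char → Bool → Bool
  | [], _ => false
  | c :: rest, q =>
    if c = '"' then pvGoA rest (!q)
    else if c = ':' ∧ q = false then true
    else pvGoA rest q

def is_activated_ability (input : String) : Bool :=
  pvGoA input.toList false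

-- ===== PORT B =====
-- hand port of str.split('"') (exact for a single-character separator)
def pvSplitQuote : List Char → List (List Char)
  | [] => [[]]
  | c :: rest =>
    let r := pvSplitQuote rest
    if c = '"' then [] :: r
    else
      match r with
      | [] => [[c]]  -- unreachable: pvSplitQuote never returns []
      | h :: t => (c :: h) :: t

-- the enumerate / parity-filter / any comprehension, step for step
def pvGoB : List (List Char) → Nat → Bool
  | [], _ => false
  | s :: rest, i => (i % 2 == 0 && s.contains ':') || pvGoB rest (i + 1)

def is_activated_ability_alt (input : String) : Bool :=
  pvGoB (pvSplitQuote input.toList) 0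

-- ===== PRECONDITION & SPEC =====
def Spec_is_activated_ability (input : String) (out : Bool) : Prop := out = is_activated_ability_alt input
instance (input : String) (out : Bool) : Decidable (Spec_is_activated_ability input out) := by unfold Spec_is_activated_ability; infer_instance

-- ===== CLAIM (what is proved, stated in full; the proofs are below) =====
def Claim_equal_is_activated_ability : Prop := ∀ (input : String), Dom_is_activated_ability input → Spec_is_activated_ability input (is_activated_ability input)

-- ===== LEMMAS AND PROOFS =====

theorem pvGoB_mod2 (segs : List (List Char)) (i : Nat) :
    pvGoB segs (i + 2) = pvGoB segs i := by
  induction segs generalizing i with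
  | nil => rfl
  | cons s rest ih =>
    simp only [pvGoB, Nat.add_mod_right]
    rw [show i + 2 + 1 = (i + 1) + 2 by omega, ih]

theorem pvSplitQuote_ne_nil (l : List Char) : pvSplitQuote l ≠ [] := by
  cases l with
  | nil => simp [pvSplitQuote]
  | cons c rest =>
    simp only [pvSplitQuote]
    split
    · simp
    · cases pvSplitQuote rest <;> simp

theorem pvGoA_eq_pvGoB (l : List Char) (q : Bool) :
    pvGoA l q = pvGoB (pvSplitQuote l) (if q then 1 else 0) := by
  induction l generalizing q with
  | nil => cases q <;> rfl
  | cons c rest ih =>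
    by_cases hq : c = '"'
    · subst hq
      simp only [pvGoA, pvSplitQuote]
      rw [ih (!q)]
      cases q
      · simp [pvGoB]
      · simp [pvGoB]
        exact (pvGoB_mod2 _ 0).symm
    · have hsplit : ∃ h t, pvSplitQuote rest = h :: t := by
        cases hr : pvSplitQuote rest with
        | nil => exact absurd hr (pvSplitQuote_ne_nil rest)
        | cons h t => exact ⟨h, t, rfl⟩
      obtain ⟨h, t, hr⟩ := hsplit
      have hsq : pvSplitQuote (c :: rest) = (c :: h) :: t := by
        simp only [pvSplitQuote, if_neg hq, hr]
      rw [hsq]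
      by_cases hc : c = ':'
      · subst hc
        cases q with
        | false =>
          simp [pvGoA, hq, pvGoB]
        | true =>
          simp only [pvGoA, if_neg hq]
          norm_num
          rw [ih true, hr]
          simp [pvGoB, pvGoB_mod2]
      · have hA : pvGoA (c :: rest) q = pvGoA rest q := by
          simp [pvGoA, hq, hc]
        rw [hA, ih q, hr]
        cases q <;> simp [pvGoB, Ne.symm hc]

-- ===== VERDICT (by name: the statement is the Claim_ definition above) =====
theorem is_activated_ability_spec : Claim_equal_is_activated_ability := by
  intro input _
  unfold Spec_is_activated_ability is_activated_ability is_activated_ability_alt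
  simpa using pvGoA_eq_pvGoB input.toList false
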